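-- pv_equiv track=rewrite | github.com/xtfocus/LightRAG | lightrag/api/routers/processing_types/processing_pdf.py | _compute_max_depth
-- ===== SOURCE A (Python) =====
-- from typing import TYPE_CHECKING, Any, Dict, Iterable, List, Optional, Tuple
--
-- def _compute_max_depth(rectangles: List[Dict[str, Any]]) -> int:
--     children_map: Dict[str, List[str]] = {}
--     for rect in rectangles:
--         parent = rect.get("parent_id")
--         if parent:
--             children_map.setdefault(parent, []).append(rect["rect_id"])
--
--     def depth(rect_id: str) -> int:
--         if rect_id not in children_map:
--             return 1
--         return 1 + max(depth(child_id) for child_id in children_map[rect_id])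
--
--     depths = []
--     for rect in rectangles:
--         if not rect.get("parent_id"):
--             depths.append(depth(rect["rect_id"]))
--     return max(depths) if depths else 0
-- ===== SOURCE B (Python) =====
-- def _compute_max_depth(rectangles):
--     children_map = {}
--     frontier = []
--     for rect in rectangles:
--         parent = rect.get("parent_id")
--         if parent:
--             children_map.setdefault(parent, []).append(rect["rect_id"])
--         else:
--             frontier.append(rect["rect_id"])
--     depth = 0
--     while frontier:
--         depth += 1
--         frontier = [c for x in frontier for c in children_map.get(x, [])]
--     return depth
-- ===== Notes on version B (the rewrite author's own statement) =====
-- stated objective: alternative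
-- what changed: The recursive per-root depth helper plus the second pass taking a max of per-root depths is replaced by one building pass that also collects the roots, followed by an iterative breadth-first level count (frontier := roots; each round replaces the frontier by all children and increments the depth); Pre_ excludes exactly the inputs where A raises: rects missing the 'rect_id' key (KeyError) and parent-child id graphs with a cycle reachable from a root, on which A's recursion (and B's loop) never terminates.
import Mathlib
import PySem

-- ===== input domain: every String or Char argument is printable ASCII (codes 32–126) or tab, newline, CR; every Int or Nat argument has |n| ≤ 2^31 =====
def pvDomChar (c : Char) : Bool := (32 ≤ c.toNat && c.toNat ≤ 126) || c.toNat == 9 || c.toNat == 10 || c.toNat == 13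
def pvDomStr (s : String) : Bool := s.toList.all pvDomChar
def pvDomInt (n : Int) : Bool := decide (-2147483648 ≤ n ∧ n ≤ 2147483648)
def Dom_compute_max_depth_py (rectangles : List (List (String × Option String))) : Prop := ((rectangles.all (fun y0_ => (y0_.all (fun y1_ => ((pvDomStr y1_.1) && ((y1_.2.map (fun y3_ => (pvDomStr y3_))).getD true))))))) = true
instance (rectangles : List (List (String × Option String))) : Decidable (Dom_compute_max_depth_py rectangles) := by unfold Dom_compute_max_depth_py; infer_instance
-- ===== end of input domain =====

-- B replaces A's recursive per-root depth computation by an iterative breadth-first level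
-- count started from the roots (alternative decomposition, no speed claim).

-- ===== PORT A =====

-- truthiness of a Python Optional[str] value: None and "" are falsy
def pvTruthy : Option String → Bool
  | none => false
  | some s => !(s == "")

-- rect.get("parent_id"): None if the key is missing, else the stored Optional[str]
def pvGetParent (rect : List (String × Option String)) : Option String :=
  ((PySem.Dict.mk rect).get? "parent_id").join

-- rect["rect_id"]; a missing key is a Python KeyError, excluded by Pre_ (default `none` is never used there)
def pvGetRectId (rect : List (String × Option String)) : Option String :=
  ((PySem.Dict.mk rect).get? "rect_id").getD none

-- the children_map building loop of A (keys are the Python values `parent`, which mix str with the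
-- child ids' Optional[str], hence key type Option String; truthiness guarantees keys are `some p`, p ≠ "")
def pvChildrenMap (rectangles : List (List (String × Option String))) :
    PySem.Dict (Option String) (List (Option String)) :=
  rectangles.foldl (fun m rect =>
    let parent := pvGetParent rect
    if pvTruthy parent then
      -- children_map.setdefault(parent, []).append(rect["rect_id"])
      m.insert parent (m.getD parent [] ++ [pvGetRectId rect])
    else m) PySem.Dict.empty

-- Python's max over a (nonempty) list of ints; exact here because every list it is applied to
-- consists of nonnegative values, so the 0 seed never wins over a nonempty list
def pvMaxInt (l : List Int) : Int := l.foldl max 0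

-- A's recursive `depth`, with fuel guarding totality (the Python recursion terminates on every
-- input admitted by Pre_, and rectangles.length + 1 fuel is then never exhausted)
def pvDepth (m : PySem.Dict (Option String) (List (Option String))) :
    Nat → Option String → Int
  | 0, _ => 0
  | f+1, x =>
    match m.get? x with
    | none => 1
    | some children => 1 + pvMaxInt (children.map (fun c => pvDepth m f c))

def compute_max_depth_py (rectangles : List (List (String × Option String))) : Int :=
  let m := pvChildrenMap rectangles
  let depths := rectangles.foldl (fun acc rect =>
    if pvTruthy (pvGetParent rect) then acc
    else acc ++ [pvDepth m (rectangles.length + 1) (pvGetRectId rect)]) []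
  match depths with
  | [] => 0
  | _ => pvMaxInt depths

-- ===== PORT B =====

-- B-side copies of the tiny dict-access/truthiness helpers (kept separate so B's definition
-- closure is independent of A's)
def pvTruthyB : Option String → Bool
  | none => false
  | some s => !(s == "")

def pvGetParentB (rect : List (String × Option String)) : Option String :=
  ((PySem.Dict.mk rect).get? "parent_id").join

def pvGetRectIdB (rect : List (String × Option String)) : Option String :=
  ((PySem.Dict.mk rect).get? "rect_id").getD none

-- B's while loop: each round replaces the frontier by the concatenation of the children lists and
-- increments the depth; fuel rectangles.length + 1 guards totality (never exhausted under Pre_)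
def pvLoop (m : PySem.Dict (Option String) (List (Option String))) :
    Nat → List (Option String) → Int → Int
  | 0, _, d => d
  | f+1, frontier, d =>
    match frontier with
    | [] => d
    | x :: xs => pvLoop m f ((x :: xs).flatMap (fun y => m.getD y [])) (d + 1)

def compute_max_depth_py_alt (rectangles : List (List (String × Option String))) : Int :=
  -- single pass building children_map and the root list together
  let st := rectangles.foldl
    (fun (st : PySem.Dict (Option String) (List (Option String)) × List (Option String)) rect =>
      let parent := pvGetParentB rect
      if pvTruthyB parent then
        (st.1.insert parent (st.1.getD parent [] ++ [pvGetRectIdB rect]), st.2)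
      else (st.1, st.2 ++ [pvGetRectIdB rect]))
    (PySem.Dict.empty, [])
  pvLoop st.1 (rectangles.length + 1) st.2 0

-- ===== PRECONDITION & SPEC =====

-- the parent-to-child edge of A's children_map, read directly off the input (first-match lookups)
def pvEdge (rectangles : List (List (String × Option String))) (x y : Option String) : Bool :=
  rectangles.any (fun rect =>
    !((((rect.find? (fun p => p.1 == "parent_id")).bind (fun p => p.2)).getD "") == "") &&
    (x == (rect.find? (fun p => p.1 == "parent_id")).bind (fun p => p.2)) &&
    (y == (rect.find? (fun p => p.1 == "rect_id")).bind (fun p => p.2)))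

-- the ids of the root rects (falsy parent), on which A calls depth()
def pvRootIds (rectangles : List (List (String × Option String))) : List (Option String) :=
  (rectangles.filter (fun rect =>
    (((rect.find? (fun p => p.1 == "parent_id")).bind (fun p => p.2)).getD "") == "")).map
    (fun rect => (rect.find? (fun p => p.1 == "rect_id")).bind (fun p => p.2))

-- the ids that ever occur as children (every node of a cycle is one of them)
def pvChildIds (rectangles : List (List (String × Option String))) : List (Option String) :=
  (rectangles.filter (fun rect =>
    !((((rect.find? (fun p => p.1 == "parent_id")).bind (fun p => p.2)).getD "") == ""))).map
    (fun rect => (rect.find? (fun p => p.1 == "rect_id")).bind (fun p => p.2))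

-- Pre_ excludes exactly where A raises: rects missing the "rect_id" key (KeyError) and inputs
-- whose parent-to-child id graph has a directed cycle reachable from a root id, where A's
-- recursion (and B's loop) never terminates.  Reachable-cycle existence is stated in closed form:
-- some set S of ids containing a root id has every member with an out-edge back into S (S = the
-- path from the root plus the cycle); Pre_ denies any such S.
def Pre_compute_max_depth_py (rectangles : List (List (String × Option String))) : Prop :=
  (∀ rect ∈ rectangles, "rect_id" ∈ rect.map Prod.fst)
  ∧ (∀ S ∈ (pvRootIds rectangles ++ pvChildIds rectangles).sublists,
      (∃ r ∈ S, r ∈ pvRootIds rectangles) →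
      ∃ x ∈ S, ∀ y ∈ S, pvEdge rectangles x y = false)
instance (rectangles : List (List (String × Option String))) : Decidable (Pre_compute_max_depth_py rectangles) := by unfold Pre_compute_max_depth_py; infer_instance

def pvWitness_compute_max_depth_py : (List (List (String × Option String))) :=
  [[("rect_id", some "a"), ("parent_id", none)], [("rect_id", some "b"), ("parent_id", some "a")]]

def Spec_compute_max_depth_py (rectangles : List (List (String × Option String))) (out : Int) : Prop := out = compute_max_depth_py_alt rectangles
instance (rectangles : List (List (String × Option String))) (out : Int) : Decidable (Spec_compute_max_depth_py rectangles out) := by unfold Spec_compute_max_depth_py; infer_instance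

-- ===== CLAIM (what is proved, stated in full; the proofs are below) =====
def Claim_equal_compute_max_depth_py : Prop := ∀ (rectangles : List (List (String × Option String))), Dom_compute_max_depth_py rectangles → Pre_compute_max_depth_py rectangles → Spec_compute_max_depth_py rectangles (compute_max_depth_py rectangles)

-- ===== LEMMAS AND PROOFS =====

theorem le_foldl_max (l : List Int) (a : Int) : a ≤ l.foldl max a := by
  induction l generalizing a with
  | nil => exact le_refl a
  | cons x xs ih => exact le_trans (le_max_left a x) (ih (max a x))

theorem pvMaxInt_nonneg (l : List Int) : 0 ≤ pvMaxInt l := le_foldl_max l 0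

theorem foldl_max_init (l : List Int) (a b : Int) :
    l.foldl max (max a b) = max a (l.foldl max b) := by
  induction l generalizing b with
  | nil => rfl
  | cons x xs ih =>
      simp only [List.foldl_cons, max_assoc]
      exact ih (max b x)

theorem pvMaxInt_cons (x : Int) (l : List Int) : pvMaxInt (x :: l) = max x (pvMaxInt l) := by
  show l.foldl max (max 0 x) = max x (l.foldl max 0)
  rw [max_comm 0 x, foldl_max_init]

theorem pvMaxInt_append (l₁ l₂ : List Int) :
    pvMaxInt (l₁ ++ l₂) = max (pvMaxInt l₁) (pvMaxInt l₂) := by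
  show (l₁ ++ l₂).foldl max 0 = _
  rw [List.foldl_append]
  have h : l₁.foldl max 0 = max (pvMaxInt l₁) 0 := (max_eq_left (pvMaxInt_nonneg l₁)).symm
  rw [h, foldl_max_init]
  rfl

-- max of a concatenation of children lists = max over the frontier of the per-node maxes
theorem pvMaxInt_flatMap (g : Option String → Int) (ch : Option String → List (Option String))
    (l : List (Option String)) :
    pvMaxInt ((l.flatMap ch).map g) = pvMaxInt (l.map (fun x => pvMaxInt ((ch x).map g))) := by
  induction l with
  | nil => rfl
  | cons x xs ih =>
      rw [List.flatMap_cons, List.map_append, pvMaxInt_append, List.map_cons, pvMaxInt_cons, ih]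

theorem pvMaxInt_map_succ (h : Option String → Int) (l : List (Option String))
    (hl : l ≠ []) (h0 : ∀ y ∈ l, 0 ≤ h y) :
    pvMaxInt (l.map (fun y => 1 + h y)) = 1 + pvMaxInt (l.map h) := by
  induction l with
  | nil => exact absurd rfl hl
  | cons x xs ih =>
      rw [List.map_cons, pvMaxInt_cons, List.map_cons, pvMaxInt_cons]
      cases xs with
      | nil =>
          simp only [List.map_nil]
          have hx : 0 ≤ h x := h0 x (by simp)
          show max (1 + h x) (pvMaxInt []) = 1 + max (h x) (pvMaxInt [])
          have : pvMaxInt ([] : List Int) = 0 := rfl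
          rw [this, max_eq_left (by omega), max_eq_left hx]
      | cons y ys =>
          rw [ih (by simp) (fun z hz => h0 z (List.mem_cons_of_mem x hz))]
          omega

theorem pvDepth_zero (m : PySem.Dict (Option String) (List (Option String)))
    (x : Option String) : pvDepth m 0 x = 0 := rfl

theorem pvMaxInt_map_zero (l : List (Option String)) (h : Option String → Int)
    (hz : ∀ y ∈ l, h y = 0) : pvMaxInt (l.map h) = 0 := by
  induction l with
  | nil => rfl
  | cons x xs ih =>
      rw [List.map_cons, pvMaxInt_cons, hz x (by simp),
        ih (fun z hz' => hz z (List.mem_cons_of_mem x hz'))]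
      simp

-- one unfolding of A's depth, phrased through getD so it is uniform in whether x has children
theorem pvDepth_step (m : PySem.Dict (Option String) (List (Option String))) (f : Nat)
    (x : Option String) :
    pvDepth m (f + 1) x = 1 + pvMaxInt ((m.getD x []).map (fun c => pvDepth m f c)) := by
  show (match m.get? x with
    | none => 1
    | some children => 1 + pvMaxInt (children.map (fun c => pvDepth m f c))) = _
  cases h : m.get? x with
  | none => rw [PySem.Dict.getD_eq_get?_getD, h]; rfl
  | some ch => rw [PySem.Dict.getD_eq_get?_getD, h]; rfl

-- B's level-counting loop computes d + (max over the frontier of A's fuelled depth)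
theorem pvLoop_eq (m : PySem.Dict (Option String) (List (Option String))) :
    ∀ (f : Nat) (frontier : List (Option String)) (d : Int),
      pvLoop m f frontier d = d + pvMaxInt (frontier.map (fun x => pvDepth m f x)) := by
  intro f
  induction f with
  | zero =>
      intro frontier d
      rw [pvMaxInt_map_zero frontier _ (fun y _ => pvDepth_zero m y)]
      show d = d + 0
      omega
  | succ f ih =>
      intro frontier d
      cases frontier with
      | nil => show d = d + pvMaxInt []; show d = d + 0; omega
      | cons x xs =>
          show pvLoop m f ((x :: xs).flatMap (fun y => m.getD y [])) (d + 1) = _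
          rw [ih]
          rw [pvMaxInt_flatMap (fun c => pvDepth m f c) (fun y => m.getD y []) (x :: xs)]
          have hrw : (x :: xs).map (fun y => pvDepth m (f + 1) y)
              = (x :: xs).map (fun y => 1 + pvMaxInt ((m.getD y []).map (fun c => pvDepth m f c))) :=
            List.map_congr_left (fun y _ => pvDepth_step m f y)
          rw [hrw, pvMaxInt_map_succ _ _ (by simp)
            (fun y _ => pvMaxInt_nonneg ((m.getD y []).map (fun c => pvDepth m f c)))]
          omega

-- A's depths-collecting fold is the map over the roots
theorem foldl_append_if_eq (l : List (List (String × Option String)))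
    (m : PySem.Dict (Option String) (List (Option String))) (n : Nat) :
    ∀ acc : List Int,
      l.foldl (fun acc rect =>
        if pvTruthy (pvGetParent rect) then acc
        else acc ++ [pvDepth m n (pvGetRectId rect)]) acc
      = acc ++ ((l.filter (fun r => !pvTruthy (pvGetParent r))).map
          (fun r => pvDepth m n (pvGetRectId r))) := by
  induction l with
  | nil => intro acc; simp
  | cons r rs ih =>
      intro acc
      by_cases h : pvTruthy (pvGetParent r) = true
      · simp only [List.foldl_cons, h, if_true, List.filter_cons, Bool.not_eq_eq_eq_not]
        rw [ih]
        simp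
      · have h' : pvTruthy (pvGetParent r) = false := by
          cases hb : pvTruthy (pvGetParent r) with
          | false => rfl
          | true => exact absurd hb h
        simp only [List.foldl_cons, h', List.filter_cons]
        rw [ih]
        simp

theorem pvTruthyB_eq : pvTruthyB = pvTruthy := rfl
theorem pvGetParentB_eq : pvGetParentB = pvGetParent := rfl
theorem pvGetRectIdB_eq : pvGetRectIdB = pvGetRectId := rfl

-- B's single pass builds exactly A's children_map together with the root-id list
theorem foldl_pair_eq (l : List (List (String × Option String))) :
    ∀ (m0 : PySem.Dict (Option String) (List (Option String))) (r0 : List (Option String)),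
      l.foldl (fun st rect =>
        let parent := pvGetParentB rect
        if pvTruthyB parent then
          (st.1.insert parent (st.1.getD parent [] ++ [pvGetRectIdB rect]), st.2)
        else (st.1, st.2 ++ [pvGetRectIdB rect])) (m0, r0)
      = (l.foldl (fun m rect =>
          let parent := pvGetParent rect
          if pvTruthy parent then m.insert parent (m.getD parent [] ++ [pvGetRectId rect])
          else m) m0,
         r0 ++ (l.filter (fun r => !pvTruthy (pvGetParent r))).map (fun r => pvGetRectId r)) := by
  simp only [pvTruthyB_eq, pvGetParentB_eq, pvGetRectIdB_eq]
  induction l with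
  | nil => intro m0 r0; simp
  | cons r rs ih =>
      intro m0 r0
      by_cases h : pvTruthy (pvGetParent r) = true
      · simp only [List.foldl_cons, h, if_true, List.filter_cons, Bool.not_eq_eq_eq_not]
        rw [ih]
        simp
      · have h' : pvTruthy (pvGetParent r) = false := by
          cases hb : pvTruthy (pvGetParent r) with
          | false => rfl
          | true => exact absurd hb h
        simp only [List.foldl_cons, h', List.filter_cons]
        rw [ih]
        simp

theorem ports_agree (rectangles : List (List (String × Option String))) :
    compute_max_depth_py rectangles = compute_max_depth_py_alt rectangles := by
  unfold compute_max_depth_py compute_max_depth_py_alt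
  rw [foldl_pair_eq, pvLoop_eq]
  simp only [List.nil_append]
  unfold pvChildrenMap
  rw [foldl_append_if_eq, List.nil_append, List.map_map]
  set m := rectangles.foldl (fun m rect =>
    let parent := pvGetParent rect
    if pvTruthy parent then m.insert parent (m.getD parent [] ++ [pvGetRectId rect])
    else m) PySem.Dict.empty with hm
  set roots := rectangles.filter (fun r => !pvTruthy (pvGetParent r)) with hroots
  cases hr : roots.map (fun r => pvDepth m (rectangles.length + 1) (pvGetRectId r)) with
  | nil =>
      have : roots.map ((fun x => pvDepth m (rectangles.length + 1) x) ∘ fun r => pvGetRectId r)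
          = [] := by simpa [Function.comp] using hr
      rw [this]
      rfl
  | cons a as =>
      have hc : roots.map ((fun x => pvDepth m (rectangles.length + 1) x) ∘ fun r => pvGetRectId r)
          = a :: as := by simpa [Function.comp] using hr
      rw [hc]
      show pvMaxInt (a :: as) = 0 + pvMaxInt (a :: as)
      omega

-- ===== VERDICT (by name: the statement is the Claim_ definition above) =====
theorem compute_max_depth_py_spec : Claim_equal_compute_max_depth_py := by
  intro rectangles _ _
  exact ports_agree rectangles
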